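-- pv_equiv track=rewrite | github.com/daizhouchen/doc-archaeologist | scripts/report.py | compute_grade
-- ===== SOURCE A (Python) =====
-- def compute_grade(findings: list) -> str:
--     """Compute an A-F health grade based on findings."""
--     critical = sum(1 for f in findings if f["severity"] == "critical")
--     warnings = sum(1 for f in findings if f["severity"] == "warning")
--     suggestions = sum(1 for f in findings if f["severity"] == "suggestion")
--
--     # Simple scoring: each critical = -20, warning = -5, suggestion = -1
--     score = 100 - (critical * 20) - (warnings * 5) - (suggestions * 1)
--     score = max(0, min(100, score))
--
--     if score >= 90:
--         return "A"
--     elif score >= 80: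
--         return "B"
--     elif score >= 70:
--         return "C"
--     elif score >= 60:
--         return "D"
--     else:
--         return "F"
-- ===== SOURCE B (Python) =====
-- def compute_grade(findings: list) -> str:
--     """Compute an A-F health grade based on findings."""
--     weights = {"critical": 20, "warning": 5, "suggestion": 1}
--     score = 100
--     for f in findings:
--         score -= weights.get(f["severity"], 0)
--     score = max(0, min(100, score))
--     if score >= 90:
--         return "A"
--     elif score >= 80:
--         return "B"
--     elif score >= 70:
--         return "C"
--     elif score >= 60:
--         return "D"
--     else:
--         return "F"
-- ===== Notes on version B (the rewrite author's own statement) =====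
-- stated objective: simpler
-- what changed: Replaces A's three independent counting scans over findings (one per severity) plus a score formula with a single accumulating pass that subtracts a weight looked up in a dict for each finding.
import Mathlib
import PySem

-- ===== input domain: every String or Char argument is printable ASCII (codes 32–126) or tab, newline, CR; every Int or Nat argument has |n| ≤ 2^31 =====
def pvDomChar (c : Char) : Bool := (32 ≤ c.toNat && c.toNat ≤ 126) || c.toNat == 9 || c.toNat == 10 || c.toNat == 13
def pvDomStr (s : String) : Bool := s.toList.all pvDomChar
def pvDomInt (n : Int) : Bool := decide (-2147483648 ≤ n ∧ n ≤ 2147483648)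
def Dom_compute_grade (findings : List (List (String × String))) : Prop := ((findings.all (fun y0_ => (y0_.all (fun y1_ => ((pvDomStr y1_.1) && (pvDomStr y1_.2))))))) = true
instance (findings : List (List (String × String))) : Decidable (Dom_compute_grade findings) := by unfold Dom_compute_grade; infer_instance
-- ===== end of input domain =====

-- B replaces A's three counting scans with one accumulating pass over a weight dict; objective: simpler.

-- ===== PORT A =====
-- f["severity"]: under Pre_ every finding dict has the key, so getD's default is never taken
def compute_grade (findings : List (List (String × String))) : String :=
  let critical : Int := findings.foldl (fun a f => if PySem.Dict.getD ⟨f⟩ "severity" "" == "critical" then a + 1 else a) 0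
  let warnings : Int := findings.foldl (fun a f => if PySem.Dict.getD ⟨f⟩ "severity" "" == "warning" then a + 1 else a) 0
  let suggestions : Int := findings.foldl (fun a f => if PySem.Dict.getD ⟨f⟩ "severity" "" == "suggestion" then a + 1 else a) 0
  let score : Int := 100 - critical * 20 - warnings * 5 - suggestions * 1
  let score := max 0 (min 100 score)
  if score ≥ 90 then "A"
  else if score ≥ 80 then "B"
  else if score ≥ 70 then "C"
  else if score ≥ 60 then "D"
  else "F"

-- ===== PORT B =====
def gradeWeights : PySem.Dict String Int := ⟨[("critical", 20), ("warning", 5), ("suggestion", 1)]⟩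

def compute_grade_alt (findings : List (List (String × String))) : String :=
  let score : Int := findings.foldl
    (fun s f => s - PySem.Dict.getD gradeWeights (PySem.Dict.getD ⟨f⟩ "severity" "") 0) 100
  let score := max 0 (min 100 score)
  if score ≥ 90 then "A"
  else if score ≥ 80 then "B"
  else if score ≥ 70 then "C"
  else if score ≥ 60 then "D"
  else "F"

-- ===== PRECONDITION & SPEC =====
-- Pre_ excludes findings dicts missing the "severity" key, on which Python A raises KeyError.
def Pre_compute_grade (findings : List (List (String × String))) : Prop :=
  (findings.all (fun f => f.any (fun kv => kv.1 == "severity"))) = true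
instance (findings : List (List (String × String))) : Decidable (Pre_compute_grade findings) := by unfold Pre_compute_grade; infer_instance

def pvWitness_compute_grade : (List (List (String × String))) :=
  [[("severity", "critical")], [("severity", "warning")], [("severity", "note")]]

def Spec_compute_grade (findings : List (List (String × String))) (out : String) : Prop := out = compute_grade_alt findings
instance (findings : List (List (String × String))) (out : String) : Decidable (Spec_compute_grade findings out) := by unfold Spec_compute_grade; infer_instance

-- ===== CLAIM (what is proved, stated in full; the proofs are below) =====
def Claim_equal_compute_grade : Prop := ∀ (findings : List (List (String × String))), Dom_compute_grade findings → Pre_compute_grade findings → Spec_compute_grade findings (compute_grade findings)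

-- ===== LEMMAS AND PROOFS =====

-- B's single accumulating fold computes A's score formula over the three counts.
lemma grade_fold (l : List (List (String × String))) :
    ∀ (s c w g : Int), s = 100 - c * 20 - w * 5 - g * 1 →
    l.foldl (fun s f => s - PySem.Dict.getD gradeWeights (PySem.Dict.getD ⟨f⟩ "severity" "") 0) s
      = 100
        - (l.foldl (fun a f => if PySem.Dict.getD ⟨f⟩ "severity" "" == "critical" then a + 1 else a) c) * 20
        - (l.foldl (fun a f => if PySem.Dict.getD ⟨f⟩ "severity" "" == "warning" then a + 1 else a) w) * 5
        - (l.foldl (fun a f => if PySem.Dict.getD ⟨f⟩ "severity" "" == "suggestion" then a + 1 else a) g) * 1 := by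
  induction l with
  | nil => intro s c w g h; simpa using h
  | cons f t ih =>
    intro s c w g h
    simp only [List.foldl_cons]
    apply ih
    generalize PySem.Dict.getD ⟨f⟩ "severity" "" = sev
    by_cases h1 : sev = "critical"
    · simp [h1, gradeWeights, PySem.Dict.getD, PySem.Dict.get?]; omega
    · by_cases h2 : sev = "warning"
      · simp [h2, gradeWeights, PySem.Dict.getD, PySem.Dict.get?]; omega
      · by_cases h3 : sev = "suggestion"
        · simp [h3, gradeWeights, PySem.Dict.getD, PySem.Dict.get?]; omega
        · simp [h1, h2, h3, gradeWeights, PySem.Dict.getD, PySem.Dict.get?, List.find?,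
                beq_eq_false_iff_ne.mpr (Ne.symm h1), beq_eq_false_iff_ne.mpr (Ne.symm h2),
                beq_eq_false_iff_ne.mpr (Ne.symm h3)]; omega

-- ===== VERDICT (by name: the statement is the Claim_ definition above) =====
theorem compute_grade_spec : Claim_equal_compute_grade := by
  intro findings _ _
  unfold Spec_compute_grade compute_grade compute_grade_alt
  rw [grade_fold findings 100 0 0 0 (by ring)]
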